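-- pv_equiv track=rewrite | github.com/sep/spark-kindling-framework | tests/system/test_helpers.py | _merge_extension_specs
-- ===== SOURCE A (Python) =====
-- from typing import Any, Callable, Dict, List, Optional, Set
--
-- def _extension_package_name(spec: str) -> str:
--     """Extract the normalized package name from a requirement spec."""
--     return spec.split(">")[0].split("=")[0].split("<")[0].split("!")[0].strip()
--
-- def _has_version_spec(spec: str) -> bool:
--     """Return True when a requirement string contains an explicit version operator."""
--     return any(op in spec for op in [">=", "<=", "==", "!=", ">", "<", "~="])
--
-- def _merge_extension_specs(existing: Any, injected: List[str]) -> List[str]: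
--     """Merge extension specs, preferring explicitly versioned requirements."""
--     merged: Dict[str, str] = {}
--
--     normalized_existing: List[str]
--     if not existing:
--         normalized_existing = []
--     elif isinstance(existing, str):
--         normalized_existing = [existing]
--     else:
--         normalized_existing = [str(item) for item in existing]
--
--     for spec in normalized_existing + [str(item) for item in injected if str(item).strip()]:
--         pkg_name = _extension_package_name(spec)
--         if not pkg_name:
--             continue
--
--         if pkg_name in merged:
--             if _has_version_spec(spec) and not _has_version_spec(merged[pkg_name]):
--                 merged[pkg_name] = spec
--             continue
--
--         merged[pkg_name] = spec
--
--     return list(merged.values())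
-- ===== SOURCE B (Python) =====
-- from typing import Any, Dict, List
--
-- def _extension_package_name(spec: str) -> str:
--     return spec.split(">")[0].split("=")[0].split("<")[0].split("!")[0].strip()
--
-- def _has_version_spec(spec: str) -> bool:
--     return any(op in spec for op in [">=", "<=", "==", "!=", ">", "<", "~="])
--
-- def _merge_extension_specs(existing: Any, injected: List[str]) -> List[str]:
--     """Merge extension specs, preferring explicitly versioned requirements."""
--     if not existing:
--         normalized_existing = []
--     elif isinstance(existing, str):
--         normalized_existing = [existing]
--     else:
--         normalized_existing = [str(item) for item in existing]
--
--     groups: Dict[str, List[str]] = {}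
--     for spec in normalized_existing + [str(item) for item in injected if str(item).strip()]:
--         pkg_name = _extension_package_name(spec)
--         if not pkg_name:
--             continue
--         groups.setdefault(pkg_name, []).append(spec)
--
--     return [next((s for s in specs if _has_version_spec(s)), specs[0])
--             for specs in groups.values()]
-- ===== Notes on version B (the rewrite author's own statement) =====
-- stated objective: simpler
-- what changed: B replaces A's conditional in-place dict overwriting with a two-pass decomposition: first group all specs per package name in insertion order, then pick each group's first versioned spec (falling back to its first spec).
import Mathlib
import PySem

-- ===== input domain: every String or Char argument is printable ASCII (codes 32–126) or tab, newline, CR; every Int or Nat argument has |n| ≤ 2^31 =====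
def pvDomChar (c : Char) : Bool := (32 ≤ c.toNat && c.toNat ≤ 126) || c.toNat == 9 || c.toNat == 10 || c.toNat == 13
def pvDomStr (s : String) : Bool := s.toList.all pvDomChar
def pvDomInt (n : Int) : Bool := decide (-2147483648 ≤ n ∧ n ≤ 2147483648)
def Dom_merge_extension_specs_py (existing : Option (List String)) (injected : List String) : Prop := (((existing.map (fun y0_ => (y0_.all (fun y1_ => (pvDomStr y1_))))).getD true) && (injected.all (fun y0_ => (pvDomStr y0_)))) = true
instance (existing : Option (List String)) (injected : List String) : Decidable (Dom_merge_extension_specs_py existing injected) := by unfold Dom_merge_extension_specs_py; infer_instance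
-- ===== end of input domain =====

-- B is a simpler two-pass decomposition of A (group per package, then select); return values proved equal.

-- ===== PORT A =====
-- shared module helpers, transliterated
def pvSplitHead (s : String) (sep : String) : String :=
  ((PySem.Str.split? s sep).getD []).headD ""

def pvPkgName (spec : String) : String :=
  PySem.Str.strip (pvSplitHead (pvSplitHead (pvSplitHead (pvSplitHead spec ">") "=") "<") "!")

def pvHasVersionSpec (spec : String) : Bool :=
  [">=", "<=", "==", "!=", ">", "<", "~="].any (fun op => PySem.Str.isIn op spec)

-- the normalization both Pythons perform (isinstance-str branch is unreachable for List String)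
def pvNormalize (existing : Option (List String)) (injected : List String) : List String :=
  (match existing with
   | none => []
   | some l => if l = [] then [] else l) ++
  injected.filter (fun s => PySem.Str.strip s ≠ "")

def pvStepA (d : PySem.Dict String String) (spec : String) : PySem.Dict String String :=
  let pkg := pvPkgName spec
  if pkg = "" then d
  else if d.contains pkg then
    (if pvHasVersionSpec spec && !pvHasVersionSpec (d.getD pkg "") then d.insert pkg spec else d)
  else d.insert pkg spec

def merge_extension_specs_py (existing : Option (List String)) (injected : List String) : List String :=
  ((pvNormalize existing injected).foldl pvStepA PySem.Dict.empty).values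

-- ===== PORT B =====
def pvStepB (g : PySem.Dict String (List String)) (spec : String) : PySem.Dict String (List String) :=
  let pkg := pvPkgName spec
  if pkg = "" then g else g.insert pkg (g.getD pkg [] ++ [spec])

def pvSelect (lst : List String) : String :=
  match lst.find? pvHasVersionSpec with
  | some s => s
  | none => lst.headD ""

def merge_extension_specs_py_alt (existing : Option (List String)) (injected : List String) : List String :=
  (((pvNormalize existing injected).foldl pvStepB PySem.Dict.empty).values).map pvSelect

-- ===== PRECONDITION & SPEC =====
def Spec_merge_extension_specs_py (existing : Option (List String)) (injected : List String) (out : List String) : Prop := out = merge_extension_specs_py_alt existing injected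
instance (existing : Option (List String)) (injected : List String) (out : List String) : Decidable (Spec_merge_extension_specs_py existing injected out) := by unfold Spec_merge_extension_specs_py; infer_instance

-- ===== CLAIM (what is proved, stated in full; the proofs are below) =====
def Claim_equal_merge_extension_specs_py : Prop := ∀ (existing : Option (List String)) (injected : List String), Dom_merge_extension_specs_py existing injected → Spec_merge_extension_specs_py existing injected (merge_extension_specs_py existing injected)

-- ===== LEMMAS AND PROOFS =====

theorem pvSelect_singleton (s : String) : pvSelect [s] = s := by
  cases h : pvHasVersionSpec s <;> simp [pvSelect, List.find?, h]

theorem pvSelect_snoc (lst : List String) (s : String) (h : lst ≠ []) :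
    pvSelect (lst ++ [s]) =
      (if pvHasVersionSpec s && !pvHasVersionSpec (pvSelect lst) then s else pvSelect lst) := by
  cases hf : lst.find? pvHasVersionSpec with
  | some v =>
    have hv : pvHasVersionSpec v = true := List.find?_some hf
    simp [pvSelect, List.find?_append, hf, hv]
  | none =>
    have hall : ∀ x ∈ lst, pvHasVersionSpec x = false := by
      intro x hx
      simpa using List.find?_eq_none.mp hf x hx
    have hhead : pvHasVersionSpec (lst.head?.getD "") = false := by
      cases lst with
      | nil => exact absurd rfl h
      | cons a t => exact hall a (by simp)
    cases hs : pvHasVersionSpec s with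
    | true =>
      simp [pvSelect, List.find?_append, hf, hs, List.find?, hhead]
    | false =>
      have : (lst ++ [s]).find? pvHasVersionSpec = none := by
        simp [List.find?_append, hf, List.find?, hs]
      simp [pvSelect, this, hf, hhead]
      cases lst with
      | nil => exact absurd rfl h
      | cons a t => simp

-- the fold invariant: A's dict is B's group dict with pvSelect applied to each value
theorem pvFold_inv (specs : List String) (d : PySem.Dict String String)
    (g : PySem.Dict String (List String))
    (h1 : d.items = g.items.map (fun p => (p.1, pvSelect p.2)))
    (h2 : ∀ p ∈ g.items, p.2 ≠ [])
    (h3 : (g.items.map Prod.fst).Nodup) :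
    (specs.foldl pvStepA d).items =
      ((specs.foldl pvStepB g).items).map (fun p => (p.1, pvSelect p.2)) := by
  induction specs generalizing d g with
  | nil => simpa using h1
  | cons spec rest ih =>
    simp only [List.foldl_cons]
    by_cases hpkg : pvPkgName spec = ""
    · exact ih _ _ (by simp [pvStepA, pvStepB, hpkg, h1]) (by simpa [pvStepB, hpkg] using h2)
        (by simpa [pvStepB, hpkg] using h3)
    · have hfind : d.items.find? (fun p => p.1 == pvPkgName spec) =
          (g.items.find? (fun p => p.1 == pvPkgName spec)).map (fun p => (p.1, pvSelect p.2)) := by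
        rw [h1, List.find?_map]; rfl
      have hc : d.contains (pvPkgName spec) = g.contains (pvPkgName spec) := by
        simp only [PySem.Dict.contains, h1, List.any_map]; rfl
      by_cases hin : g.contains (pvPkgName spec) = true
      · -- package already present: A conditionally overwrites, B appends to the group
        obtain ⟨q, hq⟩ : ∃ q, g.items.find? (fun p => p.1 == pvPkgName spec) = some q := by
          cases hq : g.items.find? (fun p => p.1 == pvPkgName spec) with
          | some q => exact ⟨q, rfl⟩
          | none =>
            exfalso
            simp only [PySem.Dict.contains, List.any_eq_true] at hin
            obtain ⟨x, hx, hx'⟩ := hin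
            exact absurd hx' (by simpa using List.find?_eq_none.mp hq x hx)
        have hqmem : q ∈ g.items := List.mem_of_find?_eq_some hq
        have hq1 : q.1 = pvPkgName spec := by simpa using List.find?_some hq
        have hqne : q.2 ≠ [] := h2 q hqmem
        have hgetg : g.getD (pvPkgName spec) [] = q.2 := by
          simp [PySem.Dict.getD, PySem.Dict.get?, hq]
        have hgetd : d.getD (pvPkgName spec) "" = pvSelect q.2 := by
          simp [PySem.Dict.getD, PySem.Dict.get?, hfind, hq]
        have hdB : (pvStepB g spec).items =
            g.items.map (fun p => if p.1 == pvPkgName spec then (pvPkgName spec, q.2 ++ [spec]) else p) := by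
          simp [pvStepB, hpkg, PySem.Dict.insert, hin, hgetg]
        have hsnoc := pvSelect_snoc q.2 spec hqne
        have hkeys : (pvStepB g spec).items.map Prod.fst = g.items.map Prod.fst := by
          rw [hdB, List.map_map]
          refine List.map_congr_left (fun p _ => ?_)
          by_cases hp : p.1 = pvPkgName spec
          · simp [hp]
          · simp [hp]
        have h2' : ∀ p ∈ (pvStepB g spec).items, p.2 ≠ [] := by
          intro p hp
          rw [hdB] at hp
          obtain ⟨r, hr, rfl⟩ := List.mem_map.mp hp
          by_cases hrp : r.1 = pvPkgName spec
          · simp [hrp]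
          · simpa [hrp] using h2 r hr
        have h3' : ((pvStepB g spec).items.map Prod.fst).Nodup := by rw [hkeys]; exact h3
        by_cases hcond : (pvHasVersionSpec spec && !pvHasVersionSpec (pvSelect q.2)) = true
        · have hdA : (pvStepA d spec).items =
              d.items.map (fun p => if p.1 == pvPkgName spec then (pvPkgName spec, spec) else p) := by
            simp [pvStepA, hpkg, hc, hin, hgetd, hcond, PySem.Dict.insert]
          refine ih _ _ ?_ h2' h3'
          rw [hdA, hdB, h1, List.map_map, List.map_map]
          refine List.map_congr_left (fun p _ => ?_)
          by_cases hp : p.1 = pvPkgName spec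
          · simp [Function.comp, hp, hsnoc, hcond]
          · simp [Function.comp, hp]
        · have hdA : (pvStepA d spec).items = d.items := by
            simp [pvStepA, hpkg, hc, hin, hgetd, hcond]
          refine ih _ _ ?_ h2' h3'
          rw [hdA, hdB, h1, List.map_map]
          refine List.map_congr_left (fun p hpmem => ?_)
          by_cases hp : p.1 = pvPkgName spec
          · have hpq : p = q := List.inj_on_of_nodup_map h3 hpmem hqmem (hp.trans hq1.symm)
            subst hpq
            simp [Function.comp, hp, hsnoc, hcond]
          · simp [Function.comp, hp]
      · -- new package: both sides append a fresh entry
        have hgf : g.items.find? (fun p => p.1 == pvPkgName spec) = none := by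
          rw [List.find?_eq_none]
          intro x hx hx'
          exact hin (by simp only [PySem.Dict.contains, List.any_eq_true]; exact ⟨x, hx, hx'⟩)
        have hdA : (pvStepA d spec).items = d.items ++ [(pvPkgName spec, spec)] := by
          simp [pvStepA, hpkg, PySem.Dict.insert, hc, hin]
        have hdB : (pvStepB g spec).items = g.items ++ [(pvPkgName spec, [spec])] := by
          simp [pvStepB, hpkg, PySem.Dict.insert, hin, PySem.Dict.getD, PySem.Dict.get?, hgf]
        refine ih _ _ ?_ ?_ ?_
        · rw [hdA, hdB, List.map_append, h1]
          simp [pvSelect_singleton]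
        · intro p hp
          rw [hdB] at hp
          rcases List.mem_append.mp hp with hp | hp
          · exact h2 p hp
          · simp only [List.mem_singleton] at hp
            subst hp; simp
        · rw [hdB, List.map_append]
          simp only [List.map_cons, List.map_nil]
          rw [List.nodup_append]
          refine ⟨h3, List.nodup_singleton _, ?_⟩
          intro a ha b hb heq
          simp only [List.mem_singleton] at hb
          obtain ⟨r, hr, hr1⟩ := List.mem_map.mp ha
          have : g.contains (pvPkgName spec) = true := by
            simp only [PySem.Dict.contains, List.any_eq_true]
            exact ⟨r, hr, by simp [hr1, heq, hb]⟩
          exact hin this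

theorem merge_extension_specs_py_spec : Claim_equal_merge_extension_specs_py := by
  intro existing injected _
  unfold Spec_merge_extension_specs_py merge_extension_specs_py merge_extension_specs_py_alt
  have h := pvFold_inv (pvNormalize existing injected) PySem.Dict.empty PySem.Dict.empty
    (by simp [PySem.Dict.empty]) (by simp [PySem.Dict.empty]) (by simp [PySem.Dict.empty])
  simp [PySem.Dict.values, h, Function.comp]
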